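-- pv_equiv track=rewrite | github.com/iam-rajesh-patnala/Programming-Foundations | 9__Functions/FOUNDATION EXAM - 2/shift_numbers-2.py | input_word
-- ===== SOURCE A (Python) =====
-- def input_word(word):
--     numbers = ""
--     alphabets = ""
--     for char in word:
--         if char.isdigit():
--             numbers += char
--         else:
--             alphabets += char
--     order_word = numbers + alphabets
--     return order_word
-- ===== SOURCE B (Python) =====
-- def input_word(word):
--     return ''.join(sorted(word, key=lambda c: not c.isdigit()))
-- ===== Notes on version B (the rewrite author's own statement) =====
-- stated objective: idiomatic
-- what changed: Replaces the explicit two-accumulator partition loop with a single stable sort of the characters keyed on whether the character is a non-digit, whose stability reproduces A's order exactly.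
import Mathlib
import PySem

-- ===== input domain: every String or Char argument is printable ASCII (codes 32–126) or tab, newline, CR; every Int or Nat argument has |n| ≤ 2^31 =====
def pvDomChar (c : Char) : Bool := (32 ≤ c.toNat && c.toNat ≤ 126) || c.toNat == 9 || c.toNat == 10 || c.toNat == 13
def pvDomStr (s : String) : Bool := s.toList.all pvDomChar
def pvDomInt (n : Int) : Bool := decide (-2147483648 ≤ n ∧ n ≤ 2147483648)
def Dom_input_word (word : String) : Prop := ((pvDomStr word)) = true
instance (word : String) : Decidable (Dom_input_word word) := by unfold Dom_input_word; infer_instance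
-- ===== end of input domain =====

-- B replaces A's two-accumulator partition loop with one stable sort on the key 'not c.isdigit()' (idiomatic; not claimed faster).

-- ===== PORT A =====
-- the loop building the two accumulator strings 'numbers' and 'alphabets'
def input_word (word : String) : String :=
  let s := word.toList.foldl
    (fun (acc : List Char × List Char) char =>
      if PySem.Chars.isdigit char then (acc.1 ++ [char], acc.2) else (acc.1, acc.2 ++ [char]))
    ([], [])
  String.ofList (s.1 ++ s.2)

-- ===== PORT B =====
def input_word_alt (word : String) : String :=
  String.ofList (PySem.List.sorted word.toList (fun c => !PySem.Chars.isdigit c) false)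

-- ===== PRECONDITION & SPEC =====
def Spec_input_word (word : String) (out : String) : Prop := out = input_word_alt word
instance (word : String) (out : String) : Decidable (Spec_input_word word out) := by unfold Spec_input_word; infer_instance

-- ===== CLAIM (what is proved, stated in full; the proofs are below) =====
def Claim_equal_input_word : Prop := ∀ (word : String), Dom_input_word word → Spec_input_word word (input_word word)

-- ===== LEMMAS AND PROOFS =====

-- inserting x into a 'digits ++ non-digits' list keeps that shape (stability of the boolean-key sort)
lemma insertBy_part (p : Char → Bool) (x : Char) (ds ns : List Char)
    (hd : ∀ d ∈ ds, p d = true) (hn : ∀ n ∈ ns, p n = false) :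
    PySem.List.insertBy (fun a b => decide ((!p a) < (!p b))) x (ds ++ ns) =
      if p x then ds ++ x :: ns else (ds ++ ns) ++ [x] := by
  induction ds with
  | nil =>
    simp only [List.nil_append]
    induction ns with
    | nil => simp [PySem.List.insertBy]
    | cons n ns ihn =>
      have hpn : p n = false := hn n (by simp)
      simp only [PySem.List.insertBy, hpn]
      cases hx : p x with
      | true => simp
      | false =>
        simp only [Bool.not_false, decide_eq_true_eq]
        rw [if_neg (by simp)]
        rw [ihn (fun m hm => hn m (by simp [hm]))]
        simp [hx]
  | cons d ds ihd =>
    have hpd : p d = true := hd d (by simp)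
    simp only [List.cons_append, PySem.List.insertBy, hpd]
    rw [if_neg (by simp)]
    rw [ihd (fun m hm => hd m (by simp [hm]))]
    cases hx : p x <;> simp

-- folding insertBy over xs from a partitioned accumulator yields the partition of the whole
lemma foldl_insert_part (p : Char → Bool) (xs : List Char) :
    ∀ (ds ns : List Char), (∀ d ∈ ds, p d = true) → (∀ n ∈ ns, p n = false) →
    xs.foldl (fun acc x => PySem.List.insertBy (fun a b => decide ((!p a) < (!p b))) x acc) (ds ++ ns) =
      (ds ++ xs.filter p) ++ (ns ++ xs.filter (fun c => !p c)) := by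
  induction xs with
  | nil => intro ds ns _ _; simp
  | cons x xs ih =>
    intro ds ns hd hn
    simp only [List.foldl_cons]
    rw [insertBy_part p x ds ns hd hn]
    cases hx : p x with
    | true =>
      rw [if_pos rfl]
      have : ds ++ x :: ns = (ds ++ [x]) ++ ns := by simp
      rw [this, ih (ds ++ [x]) ns
        (by intro m hm; rcases List.mem_append.mp hm with h | h
            · exact hd m h
            · simp at h; simpa [h]) hn]
      simp [hx]
    | false =>
      rw [if_neg (by simp)]
      have : (ds ++ ns) ++ [x] = ds ++ (ns ++ [x]) := by simp
      rw [this, ih ds (ns ++ [x]) hd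
        (by intro m hm; rcases List.mem_append.mp hm with h | h
            · exact hn m h
            · simp at h; simpa [h])]
      simp [hx]

-- ===== VERDICT (by name: the statement is the Claim_ definition above) =====
theorem input_word_spec : Claim_equal_input_word := by
  intro word _
  unfold Spec_input_word input_word input_word_alt
  set p := PySem.Chars.isdigit with hp
  -- A's loop is a pair of independent append loops, i.e. the two filters
  have hA : word.toList.foldl
      (fun (acc : List Char × List Char) char =>
        if p char then (acc.1 ++ [char], acc.2) else (acc.1, acc.2 ++ [char])) ([], []) =
      (word.toList.filter p, word.toList.filter (fun c => !p c)) := by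
    have he : (fun (acc : List Char × List Char) char =>
        if p char then (acc.1 ++ [char], acc.2) else (acc.1, acc.2 ++ [char])) =
        (fun (acc : List Char × List Char) char =>
          (if p char then acc.1 ++ [char] else acc.1,
           if p char then acc.2 else acc.2 ++ [char])) := by
      funext acc char; by_cases h : p char = true <;> simp [h]
    rw [he, PySem.List.foldl_prod_mk (f := fun (a : List Char) c => if p c then a ++ [c] else a)
          (g := fun (a : List Char) c => if p c then a else a ++ [c])]
    refine Prod.ext ?_ ?_
    · simpa using PySem.List.foldl_append_if_eq_filter p word.toList []
    · have he2 : (fun (a : List Char) c => if p c then a else a ++ [c]) =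
          (fun (a : List Char) c => if (!p c) then a ++ [c] else a) := by
        funext a c; cases p c <;> simp
      rw [he2]
      simpa using PySem.List.foldl_append_if_eq_filter (fun c => !p c) word.toList []
  -- B's sort is the insertBy fold, which produces the same partition
  have hB : PySem.List.sorted word.toList (fun c => !p c) false =
      word.toList.foldl
        (fun acc x => PySem.List.insertBy (fun a b => decide ((!p a) < (!p b))) x acc) [] := by
    simp [PySem.List.sorted]
  rw [hB, show ([] : List Char) = ([] : List Char) ++ [] from rfl,
      foldl_insert_part p word.toList [] [] (by simp) (by simp)]
  simp [hA]
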